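-- pv_equiv track=rewrite | github.com/AEPForGTE/ILLOD | ILLOD_IST/Function_Pool.py | detect_all_valid_distributions
-- ===== SOURCE A (Python) =====
-- import itertools
--
-- def detect_all_valid_distributions(a, t, ltr_positions, rtl_positions):
--     valid_distr = []
--     for i, char_a in enumerate(a):
--         left_bound_for_char_a = ltr_positions[i]
--         right_bound_for_char_a = rtl_positions[i]
--         findings_for_char_a = []
--         for j, char_t in enumerate(t):
--             if char_a == char_t and left_bound_for_char_a <= j and j <= right_bound_for_char_a:
--                 findings_for_char_a.append(j)
--         valid_distr.append(findings_for_char_a)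
--
--     proper_valid_distributions = list(itertools.product(*valid_distr))
--     filtered_valid_distributions = []
--     for entry in proper_valid_distributions:
--         if (all(entry[i] <= entry[i+1] for i in range(len(entry)-1))):
--             filtered_valid_distributions.append(list(entry))
--     return filtered_valid_distributions
-- ===== SOURCE B (Python) =====
-- def detect_all_valid_distributions(a, t, ltr_positions, rtl_positions):
--     # index t once: char -> ascending list of its positions
--     positions_by_char = {}
--     for j, c in enumerate(t):
--         positions_by_char.setdefault(c, []).append(j)
--
--     # iteratively extend valid (non-decreasing) partial sequences, one char of a at a time;
--     # only valid prefixes are ever kept, and lexicographic order is preserved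
--     partials = [[]]
--     for i, ch in enumerate(a):
--         lo, hi = ltr_positions[i], rtl_positions[i]
--         candidates = [j for j in positions_by_char.get(ch, []) if lo <= j <= hi]
--         partials = [seq + [j] for seq in partials
--                     for j in candidates
--                     if not seq or seq[-1] <= j]
--     return partials
-- ===== Notes on version B (the rewrite author's own statement) =====
-- stated objective: faster
-- what changed: B indexes t once by character (dict of position lists) instead of rescanning t for every char of a, and replaces 'materialise the full itertools.product then filter non-decreasing tuples' with an iterative level-by-level extension that only ever builds valid non-decreasing partial sequences (same lexicographic output order).
import Mathlib
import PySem

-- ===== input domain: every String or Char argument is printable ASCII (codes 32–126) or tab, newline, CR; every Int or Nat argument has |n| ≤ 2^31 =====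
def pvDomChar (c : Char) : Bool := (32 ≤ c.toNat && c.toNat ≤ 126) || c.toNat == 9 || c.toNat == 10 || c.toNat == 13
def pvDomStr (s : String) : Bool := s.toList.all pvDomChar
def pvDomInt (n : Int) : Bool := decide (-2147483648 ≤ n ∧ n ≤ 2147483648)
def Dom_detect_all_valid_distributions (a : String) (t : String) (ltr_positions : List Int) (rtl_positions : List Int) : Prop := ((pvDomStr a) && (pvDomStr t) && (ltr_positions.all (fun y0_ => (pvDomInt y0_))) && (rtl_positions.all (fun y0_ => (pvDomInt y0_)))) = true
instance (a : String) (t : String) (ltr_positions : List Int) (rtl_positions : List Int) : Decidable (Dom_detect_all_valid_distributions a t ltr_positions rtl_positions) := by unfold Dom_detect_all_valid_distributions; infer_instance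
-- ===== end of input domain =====

-- B replaces 'materialise itertools.product, then filter non-decreasing tuples' by a
-- backtracking recursion that only ever builds non-decreasing sequences (objective: faster).

-- ===== PORT A =====

-- itertools.product(*valid_distr): first component varies slowest
def avdProduct : List (List Int) → List (List Int)
  | [] => [[]]
  | l :: ls => l.flatMap (fun x => (avdProduct ls).map (x :: ·))

-- all(entry[i] <= entry[i+1] for i in range(len(entry)-1))
def avdCheck (entry : List Int) : Bool :=
  (PySem.List.pyRange 0 ((entry.length : Int) - 1) 1).all (fun i =>
    decide (PySem.List.pyGetD entry i 0 ≤ PySem.List.pyGetD entry (i + 1) 0))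

def detect_all_valid_distributions (a : String) (t : String) (ltr_positions : List Int) (rtl_positions : List Int) : List (List Int) :=
  -- first loop: valid_distr
  let valid_distr :=
    (PySem.List.enumerate a.toList).foldl (fun acc p =>
      let left_bound := PySem.List.pyGetD ltr_positions p.1 0    -- in range under Pre_
      let right_bound := PySem.List.pyGetD rtl_positions p.1 0   -- in range under Pre_
      let findings :=
        (PySem.List.enumerate t.toList).foldl (fun fs q =>
          if p.2 == q.2 && decide (left_bound ≤ q.1) && decide (q.1 ≤ right_bound)
          then fs ++ [q.1] else fs) []
      acc ++ [findings]) []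
  let proper := avdProduct valid_distr
  -- second loop: filter the non-decreasing entries
  proper.foldl (fun acc entry => if avdCheck entry then acc ++ [entry] else acc) []

-- ===== PORT B =====

-- the comprehension guard 'not seq or seq[-1] <= j' (optional lower bound)
def geOk (last : Option Int) (p : Int) : Bool :=
  match last with | none => true | some v => decide (v ≤ p)

def detect_all_valid_distributions_alt (a : String) (t : String) (ltr_positions : List Int) (rtl_positions : List Int) : List (List Int) :=
  -- index t once: char -> ascending list of its positions (setdefault(c, []).append(j))
  let positions_by_char :=
    (PySem.List.enumerate t.toList).foldl
      (fun d q => d.modify q.2 [] (· ++ [q.1])) PySem.Dict.empty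
  -- extend the valid partial sequences one char of a at a time
  (PySem.List.enumerate a.toList).foldl (fun partials p =>
    let lo := PySem.List.pyGetD ltr_positions p.1 0    -- in range under Pre_
    let hi := PySem.List.pyGetD rtl_positions p.1 0    -- in range under Pre_
    let candidates := (positions_by_char.getD p.2 []).filter
      (fun j => decide (lo ≤ j) && decide (j ≤ hi))
    partials.flatMap (fun seq =>
      (candidates.filter (fun j => geOk seq.getLast? j)).map (fun j => seq ++ [j])))
    [[]]

-- ===== PRECONDITION & SPEC =====
-- Pre_ excludes exactly the inputs on which the Python A raises IndexError:
-- ltr_positions or rtl_positions shorter than a (B raises there too).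
def Pre_detect_all_valid_distributions (a : String) (t : String) (ltr_positions : List Int) (rtl_positions : List Int) : Prop :=
  a.toList.length ≤ ltr_positions.length ∧ a.toList.length ≤ rtl_positions.length
instance (a : String) (t : String) (ltr_positions : List Int) (rtl_positions : List Int) : Decidable (Pre_detect_all_valid_distributions a t ltr_positions rtl_positions) := by unfold Pre_detect_all_valid_distributions; infer_instance

def pvWitness_detect_all_valid_distributions : String × String × List Int × List Int :=
  ("ab", "aabb", [0, 1], [3, 3])

def Spec_detect_all_valid_distributions (a : String) (t : String) (ltr_positions : List Int) (rtl_positions : List Int) (out : List (List Int)) : Prop := out = detect_all_valid_distributions_alt a t ltr_positions rtl_positions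
instance (a : String) (t : String) (ltr_positions : List Int) (rtl_positions : List Int) (out : List (List Int)) : Decidable (Spec_detect_all_valid_distributions a t ltr_positions rtl_positions out) := by unfold Spec_detect_all_valid_distributions; infer_instance

-- ===== CLAIM (what is proved, stated in full; the proofs are below) =====
def Claim_equal_detect_all_valid_distributions : Prop := ∀ (a : String) (t : String) (ltr_positions : List Int) (rtl_positions : List Int), Dom_detect_all_valid_distributions a t ltr_positions rtl_positions → Pre_detect_all_valid_distributions a t ltr_positions rtl_positions → Spec_detect_all_valid_distributions a t ltr_positions rtl_positions (detect_all_valid_distributions a t ltr_positions rtl_positions)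

-- ===== LEMMAS AND PROOFS =====

-- adjacent-pairs recursion equivalent to A's index-based check
def pairRec : List Int → Bool
  | [] => true
  | [_] => true
  | x :: y :: r => decide (x ≤ y) && pairRec (y :: r)

-- chain check with an optional lower bound for the head
def okFrom : Option Int → List Int → Bool
  | _, [] => true
  | none, x :: xs => okFrom (some x) xs
  | some v, x :: xs => decide (v ≤ x) && okFrom (some x) xs

def headOK : Option Int → List Int → Bool
  | none, _ => true
  | _, [] => true
  | some v, y :: _ => decide (v ≤ y)

-- recursive description of B's level-by-level extension, used to tie it to A's product
def altDfs : List (List Int) → Option Int → List (List Int)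
  | [], _ => [[]]
  | l :: ls, last =>
      (l.filter (geOk last)).flatMap (fun p => (altDfs ls (some p)).map (p :: ·))

theorem okFrom_eq (last : Option Int) (e : List Int) :
    okFrom last e = (headOK last e && pairRec e) := by
  induction e generalizing last with
  | nil => cases last <;> simp [okFrom, headOK, pairRec]
  | cons y r ih =>
    cases last with
    | none =>
      rw [okFrom, ih]
      cases r with
      | nil => simp [headOK, pairRec]
      | cons z r' => simp [headOK, pairRec]
    | some v =>
      rw [okFrom, ih]
      cases r with
      | nil => simp [headOK, pairRec]
      | cons z r' => simp [headOK, pairRec]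

-- A's check with the Python int index replaced by the Nat index
def natCheck (e : List Int) : Bool :=
  (List.range (e.length - 1)).all (fun i => decide (e.getD i 0 ≤ e.getD (i + 1) 0))

theorem avdCheck_eq_natCheck (e : List Int) : avdCheck e = natCheck e := by
  unfold avdCheck natCheck
  cases e with
  | nil => decide
  | cons x r =>
    have h : (((x :: r).length : Int)) - 1 = ((r.length : Nat) : Int) := by
      simp
    rw [h, PySem.List.pyRange_zero_natCast, List.all_map]
    simp only [List.length_cons, Nat.add_sub_cancel]
    congr 1
    funext i
    simp only [Function.comp_apply]
    rw [show ((i : Int) + 1) = ((i + 1 : Nat) : Int) by push_cast; ring]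
    rw [PySem.List.pyGetD_natCast, PySem.List.pyGetD_natCast]

theorem natCheck_eq_pairRec (e : List Int) : natCheck e = pairRec e := by
  induction e with
  | nil => rfl
  | cons x e ih =>
    cases e with
    | nil => rfl
    | cons y r =>
      rw [pairRec, ← ih]
      unfold natCheck
      simp only [List.length_cons, Nat.add_sub_cancel, List.range_succ_eq_map,
        List.all_cons, List.all_map]
      congr 1

theorem flatMap_if_eq_filter_flatMap {α β : Type} (l : List α) (c : α → Bool) (g : α → List β) :
    l.flatMap (fun x => if c x then g x else []) = (l.filter c).flatMap g := by
  induction l with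
  | nil => rfl
  | cons x xs ih =>
    by_cases h : c x = true <;>
      simp [List.flatMap_cons, h, ih]

theorem okFrom_cons (last : Option Int) (x : Int) (e : List Int) :
    okFrom last (x :: e) = (geOk last x && okFrom (some x) e) := by
  cases last <;> simp [okFrom, geOk]

theorem altDfs_eq_filter (ls : List (List Int)) (last : Option Int) :
    altDfs ls last = (avdProduct ls).filter (okFrom last) := by
  induction ls generalizing last with
  | nil =>
    cases last <;> simp [altDfs, avdProduct, okFrom]
  | cons l ls ih =>
    rw [altDfs, avdProduct, List.filter_flatMap]
    rw [← flatMap_if_eq_filter_flatMap l (geOk last)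
      (fun p => (altDfs ls (some p)).map (p :: ·))]
    congr 1
    funext x
    have hfm : ((avdProduct ls).map (x :: ·)).filter (okFrom last)
        = ((avdProduct ls).filter (fun e => okFrom last (x :: e))).map (x :: ·) := by
      rw [List.filter_map]; rfl
    rw [hfm]
    by_cases hc : geOk last x = true
    · rw [if_pos hc, ih]
      congr 1
      apply List.filter_congr
      intro e _
      rw [okFrom_cons, hc, Bool.true_and]
    · rw [if_neg hc]
      have hfalse : ∀ e ∈ avdProduct ls, okFrom last (x :: e) = false := by
        intro e _
        rw [okFrom_cons, Bool.eq_false_iff.mpr hc, Bool.false_and]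
      rw [List.filter_eq_nil_iff.mpr (by intro e he; rw [hfalse e he]; simp)]
      rfl

-- one level of B's loop
def stepB (partials : List (List Int)) (cand : List Int) : List (List Int) :=
  partials.flatMap (fun seq =>
    (cand.filter (fun j => geOk seq.getLast? j)).map (fun j => seq ++ [j]))

-- A's findings list for one char of a, in filter/map form
def findA (t : String) (ltr rtl : List Int) (p : Int × Char) : List Int :=
  ((PySem.List.enumerate t.toList).filter (fun q =>
    p.2 == q.2 && decide (PySem.List.pyGetD ltr p.1 0 ≤ q.1)
               && decide (q.1 ≤ PySem.List.pyGetD rtl p.1 0))).map (·.1)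

-- B's candidate list for one char of a
def candB (t : String) (ltr rtl : List Int) (p : Int × Char) : List Int :=
  (((PySem.List.enumerate t.toList).foldl
      (fun d q => d.modify q.2 [] (· ++ [q.1])) PySem.Dict.empty).getD p.2 []).filter
    (fun j => decide (PySem.List.pyGetD ltr p.1 0 ≤ j)
           && decide (j ≤ PySem.List.pyGetD rtl p.1 0))

theorem foldl_stepB (fs : List (List Int)) (acc : List (List Int)) :
    fs.foldl stepB acc
      = acc.flatMap (fun seq => (altDfs fs seq.getLast?).map (seq ++ ·)) := by
  induction fs generalizing acc with
  | nil =>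
    simp [altDfs]
  | cons l fs ih =>
    rw [List.foldl_cons, ih]
    unfold stepB
    rw [List.flatMap_assoc]
    congr 1
    funext seq
    rw [altDfs, List.map_flatMap, List.flatMap_map]
    congr 1
    funext j
    simp only [List.map_map]
    congr 1
    · funext r
      simp
    · rw [List.getLast?_concat]

-- the character index of t groups exactly the matching positions, in order
theorem posDict_getD (t : String) (c : Char) :
    (((PySem.List.enumerate t.toList).foldl
        (fun d q => d.modify q.2 [] (· ++ [q.1])) PySem.Dict.empty).getD c [])
      = ((PySem.List.enumerate t.toList).filter (fun q => q.2 == c)).map (·.1) := by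
  have hswap : ((PySem.List.enumerate t.toList).foldl
        (fun d q => d.modify q.2 [] (· ++ [q.1])) PySem.Dict.empty)
      = (((PySem.List.enumerate t.toList).map Prod.swap).foldl
        (fun d p => d.modify p.1 [] (· ++ [p.2])) PySem.Dict.empty) := by
    rw [List.foldl_map]
    rfl
  rw [hswap, PySem.Dict.getD_foldl_modify_append, List.filter_map, List.map_map]
  rfl

-- B's candidate list equals A's findings list
theorem candB_eq_findA (t : String) (ltr rtl : List Int) (p : Int × Char) :
    candB t ltr rtl p = findA t ltr rtl p := by
  unfold candB findA
  rw [posDict_getD, List.filter_map, List.filter_filter]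
  congr 1
  apply List.filter_congr
  intro q _
  simp only [Function.comp_apply]
  rw [show (q.2 == p.2) = (p.2 == q.2) from BEq.comm]
  rw [Bool.and_comm, ← Bool.and_assoc]

-- ===== VERDICT (by name: the statement is the Claim_ definition above) =====
theorem detect_all_valid_distributions_spec : Claim_equal_detect_all_valid_distributions := by
  intro a t ltr rtl _ _
  unfold Spec_detect_all_valid_distributions
  -- A in filter/product form
  have hA : detect_all_valid_distributions a t ltr rtl
      = List.filter avdCheck (avdProduct ((PySem.List.enumerate a.toList).map (findA t ltr rtl))) := by
    unfold detect_all_valid_distributions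
    rw [PySem.List.foldl_append_if_eq_filter, PySem.List.foldl_append_singleton_eq_map,
      List.nil_append, List.nil_append]
    congr 2
    apply List.map_congr_left
    intro p _
    rw [PySem.List.foldl_append_if, List.nil_append]
    rfl
  -- B as a fold of stepB over the candidate lists
  have hB : detect_all_valid_distributions_alt a t ltr rtl
      = ((PySem.List.enumerate a.toList).map (candB t ltr rtl)).foldl stepB [[]] := by
    unfold detect_all_valid_distributions_alt
    rw [List.foldl_map]
    rfl
  rw [hA, hB, foldl_stepB]
  have hcand : (PySem.List.enumerate a.toList).map (candB t ltr rtl)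
      = (PySem.List.enumerate a.toList).map (findA t ltr rtl) :=
    List.map_congr_left (fun p _ => candB_eq_findA t ltr rtl p)
  rw [hcand]
  have hnil : (([([] : List Int)]).flatMap (fun seq =>
      (altDfs ((PySem.List.enumerate a.toList).map (findA t ltr rtl)) seq.getLast?).map (seq ++ ·)))
      = altDfs ((PySem.List.enumerate a.toList).map (findA t ltr rtl)) none := by
    simp
  rw [hnil, altDfs_eq_filter]
  apply List.filter_congr
  intro e _
  rw [avdCheck_eq_natCheck, natCheck_eq_pairRec, okFrom_eq]
  cases e <;> simp [headOK]
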